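-- pv_equiv track=rewrite | github.com/susuhahnml/asp-game-strategies | src/players/min_max_python/min_max_python.py | check_consecutive_subsets_2d
-- ===== SOURCE A (Python) =====
-- def check_consecutive_subsets_2d(arr):
--     arr = sorted(arr)
--     consec = []
--     count=1
--     if len(arr) > 1:
--         for i in range(len(arr)-1):
--             # upwards diagonal
--             if arr[i][0]+1 == arr[i+1][0] and arr[i][1]+1 == arr[i+1][1]:
--                 count+=1
--             else:
--                 consec.append(count)
--                 count=1
--             if i == len(arr)-2:
--                 consec.append(count)
--         count = 1
--         for i in range(len(arr)-1):
--             # downwards diagonal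
--             if arr[i][0]+1 == arr[i+1][0] and arr[i][1]-1 == arr[i+1][1]:
--                 count+=1
--             else:
--                 consec.append(count)
--                 count=1
--             if i == len(arr)-2:
--                 consec.append(count)
--         return consec
--     elif len(arr) == 1:
--         return [1]
-- ===== SOURCE B (Python) =====
-- def check_consecutive_subsets_2d(arr):
--     arr = sorted(arr)
--     n = len(arr)
--     if n == 0:
--         return None
--     if n == 1:
--         return [1]
--
--     def runs(step):
--         # indices of adjacent pairs that are NOT diagonal-consecutive
--         cuts = [i for i in range(n - 1)
--                 if not (arr[i][0] + 1 == arr[i + 1][0]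
--                         and arr[i][1] + step == arr[i + 1][1])]
--         bounds = [-1] + cuts + [n - 1]
--         return [bounds[j + 1] - bounds[j] for j in range(len(bounds) - 1)]
--
--     return runs(1) + runs(-1)
-- ===== Notes on version B (the rewrite author's own statement) =====
-- stated objective: alternative
-- what changed: B replaces A's running-counter accumulator with a two-phase pass per diagonal: it first collects the 'cut' indices where adjacent sorted pairs are not diagonal-consecutive, then derives run lengths as successive differences over the boundary list [-1]+cuts+[n-1].
-- outside the precondition, e.g. on check_consecutive_subsets_2d([]): A returns None, B returns None
import Mathlib
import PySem

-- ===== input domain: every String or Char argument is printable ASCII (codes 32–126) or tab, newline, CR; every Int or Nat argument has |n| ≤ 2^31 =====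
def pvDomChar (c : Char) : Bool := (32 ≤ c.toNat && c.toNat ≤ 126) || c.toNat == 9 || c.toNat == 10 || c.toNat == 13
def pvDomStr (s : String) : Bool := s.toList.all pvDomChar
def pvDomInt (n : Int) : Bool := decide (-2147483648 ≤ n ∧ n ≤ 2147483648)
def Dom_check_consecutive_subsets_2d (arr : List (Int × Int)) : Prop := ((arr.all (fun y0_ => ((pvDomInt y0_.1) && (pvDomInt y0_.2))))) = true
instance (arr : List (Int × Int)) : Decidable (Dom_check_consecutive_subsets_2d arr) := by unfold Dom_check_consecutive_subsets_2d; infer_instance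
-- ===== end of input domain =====

-- B counts the same diagonal runs via a cut-index table and a difference pass
-- instead of A's inline running counter (objective: alternative decomposition).

-- ===== PORT A =====
-- consec/count state threaded through two index loops; the Python's
-- in-loop "if i == len(arr)-2: consec.append(count)" is kept inside the step.
def check_consecutive_subsets_2d (arr : List (Int × Int)) : List Int :=
  let s := PySem.List.sorted2 arr Prod.fst Prod.snd
  if s.length > 1 then
    let st1 := (List.range (s.length - 1)).foldl (fun (st : List Int × Int) i =>
        let st' := if (s.getD i (0, 0)).1 + 1 == (s.getD (i + 1) (0, 0)).1
                      && (s.getD i (0, 0)).2 + 1 == (s.getD (i + 1) (0, 0)).2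
                   then (st.1, st.2 + 1) else (st.1 ++ [st.2], (1 : Int))
        if i = s.length - 2 then (st'.1 ++ [st'.2], st'.2) else st') ([], 1)
    let st2 := (List.range (s.length - 1)).foldl (fun (st : List Int × Int) i =>
        let st' := if (s.getD i (0, 0)).1 + 1 == (s.getD (i + 1) (0, 0)).1
                      && (s.getD i (0, 0)).2 - 1 == (s.getD (i + 1) (0, 0)).2
                   then (st.1, st.2 + 1) else (st.1 ++ [st.2], (1 : Int))
        if i = s.length - 2 then (st'.1 ++ [st'.2], st'.2) else st') (st1.1, 1)
    st2.1
  else if s.length = 1 then [1]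
  else []  -- Python returns None here; excluded by Pre_

-- ===== PORT B =====
-- one diagonal pass of Source B's `runs(step)`: cut indices, then boundary differences
def pvAltRuns (s : List (Int × Int)) (step : Int) : List Int :=
  let cuts := (List.range (s.length - 1)).filter (fun i =>
      !((s.getD i (0, 0)).1 + 1 == (s.getD (i + 1) (0, 0)).1
        && (s.getD i (0, 0)).2 + step == (s.getD (i + 1) (0, 0)).2))
  let bounds : List Int := -1 :: (cuts.map (fun n : Nat => (n : Int)) ++ [(s.length : Int) - 1])
  (List.range (bounds.length - 1)).map (fun j => bounds.getD (j + 1) 0 - bounds.getD j 0)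

def check_consecutive_subsets_2d_alt (arr : List (Int × Int)) : List Int :=
  let s := PySem.List.sorted2 arr Prod.fst Prod.snd
  let n := s.length
  if n = 0 then []  -- Python returns None here; excluded by Pre_
  else if n = 1 then [1]
  else pvAltRuns s 1 ++ pvAltRuns s (-1)

-- ===== PRECONDITION & SPEC =====
-- Pre_ excludes only the empty list, on which Python A returns None instead of a list of ints.
def Pre_check_consecutive_subsets_2d (arr : List (Int × Int)) : Prop := arr ≠ []
instance (arr : List (Int × Int)) : Decidable (Pre_check_consecutive_subsets_2d arr) := by unfold Pre_check_consecutive_subsets_2d; infer_instance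
def pvWitness_check_consecutive_subsets_2d : (List (Int × Int)) := [(0, 0), (1, 1)]

def Spec_check_consecutive_subsets_2d (arr : List (Int × Int)) (out : List Int) : Prop := out = check_consecutive_subsets_2d_alt arr
instance (arr : List (Int × Int)) (out : List Int) : Decidable (Spec_check_consecutive_subsets_2d arr out) := by unfold Spec_check_consecutive_subsets_2d; infer_instance

-- ===== CLAIM (what is proved, stated in full; the proofs are below) =====
def Claim_equal_check_consecutive_subsets_2d : Prop := ∀ (arr : List (Int × Int)), Dom_check_consecutive_subsets_2d arr → Pre_check_consecutive_subsets_2d arr → Spec_check_consecutive_subsets_2d arr (check_consecutive_subsets_2d arr)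

-- ===== LEMMAS AND PROOFS =====

-- run lengths of a boolean adjacency list, as a structural recursion
def pvGo : List Bool → Int → List Int
  | [], c => [c]
  | b :: bs, c => if b then pvGo bs (c + 1) else c :: pvGo bs 1

-- positions of `false` entries, as integers
def pvCuts : List Bool → List Int
  | [] => []
  | true :: bs => (pvCuts bs).map (fun x => x + 1)
  | false :: bs => 0 :: (pvCuts bs).map (fun x => x + 1)

-- successive differences
def pvDiff : List Int → List Int
  | [] => []
  | [_] => []
  | a :: b :: l => (b - a) :: pvDiff (b :: l)

-- index fold over adjacent pairs = fold over zip of the list with its tail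
theorem pv_rangeFold {α σ : Type} (F : σ → α → α → σ) (d : α) :
    ∀ (l : List α) (init : σ),
      (List.range (l.length - 1)).foldl
        (fun st i => F st (l.getD i d) (l.getD (i + 1) d)) init
      = (l.zip l.tail).foldl (fun st p => F st p.1 p.2) init := by
  intro l
  induction l with
  | nil => intro init; simp
  | cons a l ih =>
    intro init
    cases l with
    | nil => simp
    | cons b t =>
      simp only [List.length_cons, Nat.add_sub_cancel, List.range_succ_eq_map,
        List.foldl_cons, List.foldl_map, Nat.succ_eq_add_one,
        List.zip_cons_cons, List.tail_cons,
        List.getD_cons_zero, List.getD_cons_succ]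
      have h := ih (F init a b)
      simp only [List.length_cons, Nat.add_sub_cancel, List.tail_cons,
        List.getD_cons_succ] at h
      exact h

-- index map over adjacent pairs = map over zip of the list with its tail
theorem pv_rangeMap {α β : Type} (F : α → α → β) (d : α) :
    ∀ (l : List α),
      (List.range (l.length - 1)).map
        (fun i => F (l.getD i d) (l.getD (i + 1) d))
      = (l.zip l.tail).map (fun p => F p.1 p.2) := by
  intro l
  induction l with
  | nil => simp
  | cons a l ih =>
    cases l with
    | nil => simp
    | cons b t =>
      simp only [List.length_cons, Nat.add_sub_cancel, List.range_succ_eq_map,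
        List.map_cons, List.map_map, List.zip_cons_cons, List.tail_cons,
        List.getD_cons_zero, List.getD_cons_succ]
      have h := ih
      simp only [List.length_cons, Nat.add_sub_cancel, List.tail_cons] at h
      rw [← h]
      congr 1

-- the index-based difference pass of B equals pvDiff
theorem pv_zip_diff : ∀ (l : List Int),
    (l.zip l.tail).map (fun p => p.2 - p.1) = pvDiff l := by
  intro l
  induction l with
  | nil => rfl
  | cons a l ih =>
    cases l with
    | nil => rfl
    | cons b t =>
      simp only [List.zip_cons_cons, List.tail_cons, List.map_cons, pvDiff]
      simp only [List.tail_cons] at ih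
      rw [List.cons.injEq]
      exact ⟨rfl, ih⟩

theorem pv_rangeMap_diff (l : List Int) :
    (List.range (l.length - 1)).map (fun j => l.getD (j + 1) 0 - l.getD j 0) = pvDiff l := by
  have h := pv_rangeMap (fun a b : Int => b - a) 0 l
  exact h.trans (pv_zip_diff l)

-- filtering the indices of false entries (cast to Int) gives pvCuts
theorem pv_filterCuts :
    ∀ (bs : List Bool),
      ((List.range bs.length).filter (fun i => !(bs.getD i true))).map (fun n : Nat => (n : Int))
        = pvCuts bs := by
  intro bs
  induction bs with
  | nil => simp [pvCuts]
  | cons b bs ih =>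
    simp only [List.length_cons, List.range_succ_eq_map, List.filter_cons]
    rw [List.filter_map]
    have hcomp : ((fun i => !((b :: bs).getD i true)) ∘ Nat.succ) = (fun i => !(bs.getD i true)) := by
      funext i
      simp [Nat.succ_eq_add_one]
    rw [hcomp]
    have hcast : ((List.range bs.length).filter (fun i => !(bs.getD i true))).map
          ((fun n : Nat => (n : Int)) ∘ Nat.succ)
        = (((List.range bs.length).filter (fun i => !(bs.getD i true))).map (fun n : Nat => (n : Int))).map
            (fun x => x + 1) := by
      rw [List.map_map]
      apply List.map_congr_left
      intro i _
      simp [Nat.succ_eq_add_one]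
    cases b with
    | true =>
      simp only [List.getD_cons_zero, Bool.not_true, Bool.false_eq_true, if_false, pvCuts]
      rw [List.map_map, hcast, ih]
    | false =>
      simp only [List.getD_cons_zero, Bool.not_false, if_true, pvCuts]
      rw [List.map_cons, List.map_map, hcast, ih]
      simp

-- difference list is invariant under a uniform shift
theorem pv_diff_shift (k : Int) : ∀ (l : List Int), pvDiff (l.map (fun x => x + k)) = pvDiff l := by
  intro l
  induction l with
  | nil => rfl
  | cons a l ih =>
    cases l with
    | nil => rfl
    | cons b t =>
      simp only [List.map_cons, pvDiff]
      simp only [List.map_cons] at ih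
      rw [List.cons.injEq]
      exact ⟨by ring, ih⟩

-- the accumulator fold of A, with its final append, produces pvGo
theorem pv_fold_go : ∀ (bs : List Bool) (acc : List Int) (c : Int),
    (bs.foldl (fun (st : List Int × Int) b =>
        if b then (st.1, st.2 + 1) else (st.1 ++ [st.2], 1)) (acc, c)).1
      ++ [(bs.foldl (fun (st : List Int × Int) b =>
        if b then (st.1, st.2 + 1) else (st.1 ++ [st.2], 1)) (acc, c)).2]
    = acc ++ pvGo bs c := by
  intro bs
  induction bs with
  | nil => intro acc c; simp [pvGo]
  | cons b bs ih =>
    intro acc c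
    cases b with
    | true => simpa [pvGo] using ih acc (c + 1)
    | false => simpa [pvGo] using ih (acc ++ [c]) 1

-- key lemma: boundary differences over the cut positions give the run lengths
theorem pv_diff_go : ∀ (bs : List Bool) (c : Int),
    pvDiff (-c :: (pvCuts bs ++ [(bs.length : Int)])) = pvGo bs c := by
  intro bs
  induction bs with
  | nil => intro c; simp [pvCuts, pvDiff, pvGo]
  | cons b bs ih =>
    intro c
    cases b with
    | true =>
      have e : (-c : Int) :: (pvCuts (true :: bs) ++ [((true :: bs).length : Int)])
          = ((-(c + 1) : Int) :: (pvCuts bs ++ [(bs.length : Int)])).map (fun x => x + 1) := by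
        simp only [pvCuts, List.length_cons, List.map_cons, List.map_append, List.map_nil]
        rw [List.cons.injEq]
        refine ⟨by ring, ?_⟩
        congr 1
      rw [e, pv_diff_shift, ih (c + 1)]
      simp [pvGo]
    | false =>
      have e : (-c : Int) :: (pvCuts (false :: bs) ++ [((false :: bs).length : Int)])
          = -c :: (((-1 : Int) :: (pvCuts bs ++ [(bs.length : Int)])).map (fun x => x + 1)) := by
        simp only [pvCuts, List.length_cons, List.map_cons, List.map_append, List.map_nil,
          List.cons_append]
        rw [List.cons.injEq]
        refine ⟨rfl, ?_⟩
        rw [List.cons.injEq]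
        refine ⟨by norm_num, ?_⟩
        congr 1
      rw [e, List.map_cons]
      simp only [pvDiff]
      rw [show pvGo (false :: bs) c = c :: pvGo bs 1 from by simp [pvGo]]
      rw [List.cons.injEq]
      refine ⟨by ring, ?_⟩
      rw [show ((-1 : Int) + 1) :: ((pvCuts bs ++ [(bs.length : Int)]).map (fun x => x + 1))
            = ((-1 : Int) :: (pvCuts bs ++ [(bs.length : Int)])).map (fun x => x + 1) from by
          rw [List.map_cons]]
      rw [pv_diff_shift, ih 1]

-- the in-loop "last index" append equals a plain fold followed by a final append
theorem pv_last_append (h : List Int × Int → Nat → List Int × Int) (m : Nat) (init : List Int × Int) :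
    ((List.range (m + 1)).foldl
        (fun st i => if i = m then ((h st i).1 ++ [(h st i).2], (h st i).2) else h st i) init).1
    = ((List.range (m + 1)).foldl h init).1 ++ [((List.range (m + 1)).foldl h init).2] := by
  rw [List.range_succ, List.foldl_append, List.foldl_append]
  have hc : (List.range m).foldl
      (fun st i => if i = m then ((h st i).1 ++ [(h st i).2], (h st i).2) else h st i) init
      = (List.range m).foldl h init :=
    PySem.List.foldl_congr_mem _ _ _ _
      (fun acc x hx => by rw [if_neg (Nat.ne_of_lt (List.mem_range.mp hx))])
  rw [hc]
  simp

-- one full A pass, for an arbitrary adjacency condition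
theorem pv_passA (s : List (Int × Int)) (cond : (Int × Int) → (Int × Int) → Bool)
    (acc : List Int) (h2 : 2 ≤ s.length) :
    ((List.range (s.length - 1)).foldl (fun (st : List Int × Int) i =>
        let st' := if cond (s.getD i (0, 0)) (s.getD (i + 1) (0, 0))
                   then (st.1, st.2 + 1) else (st.1 ++ [st.2], (1 : Int))
        if i = s.length - 2 then (st'.1 ++ [st'.2], st'.2) else st') (acc, 1)).1
      = acc ++ pvGo ((s.zip s.tail).map (fun p => cond p.1 p.2)) 1 := by
  have hm : s.length - 1 = (s.length - 2) + 1 := by omega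
  have e1 : ((List.range ((s.length - 2) + 1)).foldl (fun (st : List Int × Int) i =>
        let st' := if cond (s.getD i (0, 0)) (s.getD (i + 1) (0, 0))
                   then (st.1, st.2 + 1) else (st.1 ++ [st.2], (1 : Int))
        if i = s.length - 2 then (st'.1 ++ [st'.2], st'.2) else st') (acc, 1)).1
      = ((List.range ((s.length - 2) + 1)).foldl (fun (st : List Int × Int) i =>
          if cond (s.getD i (0, 0)) (s.getD (i + 1) (0, 0))
          then (st.1, st.2 + 1) else (st.1 ++ [st.2], (1 : Int))) (acc, 1)).1
        ++ [((List.range ((s.length - 2) + 1)).foldl (fun (st : List Int × Int) i =>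
          if cond (s.getD i (0, 0)) (s.getD (i + 1) (0, 0))
          then (st.1, st.2 + 1) else (st.1 ++ [st.2], (1 : Int))) (acc, 1)).2] :=
    pv_last_append (fun st i =>
      if cond (s.getD i (0, 0)) (s.getD (i + 1) (0, 0))
      then (st.1, st.2 + 1) else (st.1 ++ [st.2], (1 : Int))) (s.length - 2) (acc, 1)
  rw [hm, e1, ← hm]
  have e2 : (List.range (s.length - 1)).foldl (fun (st : List Int × Int) i =>
        if cond (s.getD i (0, 0)) (s.getD (i + 1) (0, 0))
        then (st.1, st.2 + 1) else (st.1 ++ [st.2], (1 : Int))) (acc, 1)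
      = ((s.zip s.tail).map (fun p => cond p.1 p.2)).foldl (fun (st : List Int × Int) b =>
          if b then (st.1, st.2 + 1) else (st.1 ++ [st.2], 1)) (acc, 1) := by
    rw [List.foldl_map]
    exact pv_rangeFold (fun st a b =>
      if cond a b then (st.1, st.2 + 1) else (st.1 ++ [st.2], (1 : Int))) (0, 0) s (acc, 1)
  rw [e2]
  exact pv_fold_go ((s.zip s.tail).map (fun p => cond p.1 p.2)) acc 1

-- the A pass specialised to the upward-diagonal condition, stated verbatim as in the port
theorem pv_passA_up (s : List (Int × Int)) (acc : List Int) (h2 : 2 ≤ s.length) :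
    ((List.range (s.length - 1)).foldl (fun (st : List Int × Int) i =>
        let st' := if (s.getD i (0, 0)).1 + 1 == (s.getD (i + 1) (0, 0)).1
                      && (s.getD i (0, 0)).2 + 1 == (s.getD (i + 1) (0, 0)).2
                   then (st.1, st.2 + 1) else (st.1 ++ [st.2], (1 : Int))
        if i = s.length - 2 then (st'.1 ++ [st'.2], st'.2) else st') (acc, 1)).1
      = acc ++ pvGo ((s.zip s.tail).map (fun p => p.1.1 + 1 == p.2.1 && p.1.2 + 1 == p.2.2)) 1 :=
  pv_passA s (fun a b => a.1 + 1 == b.1 && a.2 + 1 == b.2) acc h2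

-- the A pass specialised to the downward-diagonal condition
theorem pv_passA_down (s : List (Int × Int)) (acc : List Int) (h2 : 2 ≤ s.length) :
    ((List.range (s.length - 1)).foldl (fun (st : List Int × Int) i =>
        let st' := if (s.getD i (0, 0)).1 + 1 == (s.getD (i + 1) (0, 0)).1
                      && (s.getD i (0, 0)).2 - 1 == (s.getD (i + 1) (0, 0)).2
                   then (st.1, st.2 + 1) else (st.1 ++ [st.2], (1 : Int))
        if i = s.length - 2 then (st'.1 ++ [st'.2], st'.2) else st') (acc, 1)).1
      = acc ++ pvGo ((s.zip s.tail).map (fun p => p.1.1 + 1 == p.2.1 && p.1.2 - 1 == p.2.2)) 1 :=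
  pv_passA s (fun a b => a.1 + 1 == b.1 && a.2 - 1 == b.2) acc h2

-- B's cut-index filter names the false positions of the adjacency booleans
theorem pv_cuts_eq (s : List (Int × Int)) (step : Int) :
    ((List.range (s.length - 1)).filter (fun i =>
        !((s.getD i (0, 0)).1 + 1 == (s.getD (i + 1) (0, 0)).1
          && (s.getD i (0, 0)).2 + step == (s.getD (i + 1) (0, 0)).2))).map (fun n : Nat => (n : Int))
      = pvCuts ((s.zip s.tail).map (fun p => p.1.1 + 1 == p.2.1 && p.1.2 + step == p.2.2)) := by
  have hzlen : (s.zip s.tail).length = s.length - 1 := by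
    rcases s with _ | ⟨a, t⟩
    · simp
    · simp [List.length_zip]
  have hblen : ((s.zip s.tail).map (fun p : (Int × Int) × (Int × Int) =>
      p.1.1 + 1 == p.2.1 && p.1.2 + step == p.2.2)).length = s.length - 1 := by
    rw [List.length_map, hzlen]
  rw [← pv_filterCuts ((s.zip s.tail).map (fun p => p.1.1 + 1 == p.2.1 && p.1.2 + step == p.2.2))]
  rw [hblen]
  congr 1
  apply List.filter_congr
  intro i hi
  have hilt : i < s.length - 1 := List.mem_range.mp hi
  have h1i : i < s.length := by omega
  have h2i : i + 1 < s.length := by omega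
  have hbi : i < ((s.zip s.tail).map (fun p : (Int × Int) × (Int × Int) =>
      p.1.1 + 1 == p.2.1 && p.1.2 + step == p.2.2)).length := by rw [hblen]; exact hilt
  rw [List.getD_eq_getElem _ _ hbi, List.getD_eq_getElem _ _ h1i, List.getD_eq_getElem _ _ h2i]
  simp only [List.getElem_map, List.getElem_zip]
  rw [List.getElem_tail]

-- one full B pass equals pvGo on the same adjacency booleans
theorem pv_passB (s : List (Int × Int)) (step : Int) (h1 : 1 ≤ s.length) :
    pvAltRuns s step
      = pvGo ((s.zip s.tail).map (fun p => p.1.1 + 1 == p.2.1 && p.1.2 + step == p.2.2)) 1 := by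
  have hzlen : (s.zip s.tail).length = s.length - 1 := by
    rcases s with _ | ⟨a, t⟩
    · simp
    · simp [List.length_zip]
  have hblen : ((s.zip s.tail).map (fun p : (Int × Int) × (Int × Int) =>
      p.1.1 + 1 == p.2.1 && p.1.2 + step == p.2.2)).length = s.length - 1 := by
    rw [List.length_map, hzlen]
  unfold pvAltRuns
  show (List.range ((((-1 : Int) :: (((List.range (s.length - 1)).filter (fun i =>
      !((s.getD i (0, 0)).1 + 1 == (s.getD (i + 1) (0, 0)).1
        && (s.getD i (0, 0)).2 + step == (s.getD (i + 1) (0, 0)).2))).map (fun n : Nat => (n : Int))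
      ++ [(s.length : Int) - 1])) : List Int).length - 1)).map
      (fun j => ((-1 : Int) :: (((List.range (s.length - 1)).filter (fun i =>
        !((s.getD i (0, 0)).1 + 1 == (s.getD (i + 1) (0, 0)).1
          && (s.getD i (0, 0)).2 + step == (s.getD (i + 1) (0, 0)).2))).map (fun n : Nat => (n : Int))
        ++ [(s.length : Int) - 1])).getD (j + 1) 0
        - ((-1 : Int) :: (((List.range (s.length - 1)).filter (fun i =>
        !((s.getD i (0, 0)).1 + 1 == (s.getD (i + 1) (0, 0)).1
          && (s.getD i (0, 0)).2 + step == (s.getD (i + 1) (0, 0)).2))).map (fun n : Nat => (n : Int))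
        ++ [(s.length : Int) - 1])).getD j 0)
    = pvGo ((s.zip s.tail).map (fun p => p.1.1 + 1 == p.2.1 && p.1.2 + step == p.2.2)) 1
  rw [pv_cuts_eq s step]
  rw [pv_rangeMap_diff]
  rw [show ((s.length : Int) - 1)
        = (((s.zip s.tail).map (fun p : (Int × Int) × (Int × Int) =>
            p.1.1 + 1 == p.2.1 && p.1.2 + step == p.2.2)).length : Int) from by
      rw [hblen]; omega]
  exact pv_diff_go ((s.zip s.tail).map (fun p => p.1.1 + 1 == p.2.1 && p.1.2 + step == p.2.2)) 1

-- the n ≥ 2 branch: A's two accumulator passes equal B's two cut-and-diff passes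
theorem pv_main (s : List (Int × Int)) (h2 : 2 ≤ s.length) :
    (let st1 := (List.range (s.length - 1)).foldl (fun (st : List Int × Int) i =>
        let st' := if (s.getD i (0, 0)).1 + 1 == (s.getD (i + 1) (0, 0)).1
                      && (s.getD i (0, 0)).2 + 1 == (s.getD (i + 1) (0, 0)).2
                   then (st.1, st.2 + 1) else (st.1 ++ [st.2], (1 : Int))
        if i = s.length - 2 then (st'.1 ++ [st'.2], st'.2) else st') ([], 1)
     let st2 := (List.range (s.length - 1)).foldl (fun (st : List Int × Int) i =>
        let st' := if (s.getD i (0, 0)).1 + 1 == (s.getD (i + 1) (0, 0)).1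
                      && (s.getD i (0, 0)).2 - 1 == (s.getD (i + 1) (0, 0)).2
                   then (st.1, st.2 + 1) else (st.1 ++ [st.2], (1 : Int))
        if i = s.length - 2 then (st'.1 ++ [st'.2], st'.2) else st') (st1.1, 1)
     st2.1) = pvAltRuns s 1 ++ pvAltRuns s (-1) := by
  show ((List.range (s.length - 1)).foldl (fun (st : List Int × Int) i =>
        let st' := if (s.getD i (0, 0)).1 + 1 == (s.getD (i + 1) (0, 0)).1
                      && (s.getD i (0, 0)).2 - 1 == (s.getD (i + 1) (0, 0)).2
                   then (st.1, st.2 + 1) else (st.1 ++ [st.2], (1 : Int))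
        if i = s.length - 2 then (st'.1 ++ [st'.2], st'.2) else st')
      ((((List.range (s.length - 1)).foldl (fun (st : List Int × Int) i =>
        let st' := if (s.getD i (0, 0)).1 + 1 == (s.getD (i + 1) (0, 0)).1
                      && (s.getD i (0, 0)).2 + 1 == (s.getD (i + 1) (0, 0)).2
                   then (st.1, st.2 + 1) else (st.1 ++ [st.2], (1 : Int))
        if i = s.length - 2 then (st'.1 ++ [st'.2], st'.2) else st') ([], 1))).1, 1)).1
    = pvAltRuns s 1 ++ pvAltRuns s (-1)
  rw [pv_passA_up s [] h2, pv_passA_down s _ h2]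
  rw [pv_passB s 1 (by omega), pv_passB s (-1) (by omega)]
  rw [show (fun (p : (Int × Int) × (Int × Int)) => p.1.1 + 1 == p.2.1 && p.1.2 + (-1) == p.2.2)
        = (fun (p : (Int × Int) × (Int × Int)) => p.1.1 + 1 == p.2.1 && p.1.2 - 1 == p.2.2)
      from funext fun p => by rw [Int.sub_eq_add_neg]]
  simp

-- the two port bodies agree for every value of the shared sorted list
theorem pv_full (s : List (Int × Int)) :
    (if s.length > 1 then
      (let st1 := (List.range (s.length - 1)).foldl (fun (st : List Int × Int) i =>
          let st' := if (s.getD i (0, 0)).1 + 1 == (s.getD (i + 1) (0, 0)).1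
                        && (s.getD i (0, 0)).2 + 1 == (s.getD (i + 1) (0, 0)).2
                     then (st.1, st.2 + 1) else (st.1 ++ [st.2], (1 : Int))
          if i = s.length - 2 then (st'.1 ++ [st'.2], st'.2) else st') ([], 1)
       let st2 := (List.range (s.length - 1)).foldl (fun (st : List Int × Int) i =>
          let st' := if (s.getD i (0, 0)).1 + 1 == (s.getD (i + 1) (0, 0)).1
                        && (s.getD i (0, 0)).2 - 1 == (s.getD (i + 1) (0, 0)).2
                     then (st.1, st.2 + 1) else (st.1 ++ [st.2], (1 : Int))
          if i = s.length - 2 then (st'.1 ++ [st'.2], st'.2) else st') (st1.1, 1)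
       st2.1)
    else if s.length = 1 then [1]
    else [])
    = (if s.length = 0 then []
       else if s.length = 1 then [1]
       else pvAltRuns s 1 ++ pvAltRuns s (-1)) := by
  rcases s with _ | ⟨x, _ | ⟨y, t⟩⟩
  · simp
  · simp
  · rw [if_pos (show (x :: y :: t).length > 1 from by simp only [List.length_cons]; omega)]
    rw [if_neg (show ¬((x :: y :: t).length = 0) from by simp only [List.length_cons]; omega)]
    rw [if_neg (show ¬((x :: y :: t).length = 1) from by simp only [List.length_cons]; omega)]
    exact pv_main (x :: y :: t) (by simp only [List.length_cons]; omega)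

-- ===== VERDICT (by name: the statement is the Claim_ definition above) =====
theorem check_consecutive_subsets_2d_spec : Claim_equal_check_consecutive_subsets_2d := by
  intro arr _ _
  unfold Spec_check_consecutive_subsets_2d
  unfold check_consecutive_subsets_2d check_consecutive_subsets_2d_alt
  exact pv_full (PySem.List.sorted2 arr Prod.fst Prod.snd)
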